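-- pv_equiv track=rewrite | github.com/eltoraz/Python | CSCI-2961/hw1/cipher/cipher.py | untransposeEvenOdd
-- ===== SOURCE A (Python) =====
-- import math
--
-- def untransposeEvenOdd(S):
--     """Decrypt a string encrypted by concatenating the subtring formed from its odd-indexed characters to that
--     from its even-indexed characters"""
--     even = S[:(math.ceil(len(S)/2))]    # divide the input string, deciding the index to split at based on its length
--     odd = S[(math.ceil(len(S)/2)):]     # note: the length of the even substr will always be equal to or 1 greater than the odd
--
--     result = ''
--     for i in range(len(S)):
--         if i % 2 == 0:
--             result += even[i//2]
--         else:
--             result += odd[i//2]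
--
--     return result
-- ===== SOURCE B (Python) =====
-- import math
--
-- def untransposeEvenOdd(S):
--     """Decrypt by two bulk strided writes instead of an index loop with a parity branch."""
--     k = math.ceil(len(S) / 2)
--     even, odd = S[:k], S[k:]
--     res = [''] * len(S)
--     res[0::2] = even
--     res[1::2] = odd
--     return ''.join(res)
-- ===== Notes on version B (the rewrite author's own statement) =====
-- stated objective: simpler
-- what changed: Replaces the per-index loop with its i%2 branch, i//2 indexing and repeated string concatenation by two bulk strided slice assignments (res[0::2]=even, res[1::2]=odd) into a preallocated list, joined once.
import Mathlib
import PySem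

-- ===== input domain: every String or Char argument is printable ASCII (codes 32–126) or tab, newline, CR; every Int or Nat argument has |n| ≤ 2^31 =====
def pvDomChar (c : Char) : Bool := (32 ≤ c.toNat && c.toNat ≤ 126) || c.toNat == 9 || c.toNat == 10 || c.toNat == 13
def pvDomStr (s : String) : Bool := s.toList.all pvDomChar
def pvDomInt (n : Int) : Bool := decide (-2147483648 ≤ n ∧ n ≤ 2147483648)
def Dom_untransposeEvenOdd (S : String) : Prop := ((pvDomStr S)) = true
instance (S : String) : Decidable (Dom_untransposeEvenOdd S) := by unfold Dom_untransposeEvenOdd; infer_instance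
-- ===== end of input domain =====

-- B replaces A's per-index loop (parity branch, quadratic string concatenation) by two bulk
-- strided slice writes into a preallocated list; objective: simpler.

-- ===== PORT A =====
-- math.ceil(len(S)/2) = (n+1)/2 exactly for a nonnegative length n.
-- range(len(S)) yields the nonnegative ints 0..n-1, so a Nat loop with Nat / and % is exact;
-- even[i//2] / odd[i//2] use a nonnegative index, so Python indexing is `getElem?`
-- (Option.toList: a missing index would contribute nothing; it is provably always present).
def untransposeEvenOdd (S : String) : String :=
  let cs := S.toList
  let n := cs.length
  let even := PySem.List.slice cs none (some ((((n + 1) / 2) : Nat) : Int))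
  let odd := PySem.List.slice cs (some ((((n + 1) / 2) : Nat) : Int)) none
  let result := (List.range n).foldl
    (fun r i => if i % 2 = 0 then r ++ (even[i / 2]?).toList else r ++ (odd[i / 2]?).toList) []
  String.ofList result

-- ===== PORT B =====
-- The preallocated list res with res[0::2] = even, res[1::2] = odd followed by ''.join(res)
-- places even's characters at positions 0,2,4,… and odd's at 1,3,5,…, i.e. it interleaves
-- the two halves (their lengths match the strides exactly by construction).
def pvInterleave : List Char → List Char → List Char
  | [], ys => ys
  | x :: xs, ys => x :: pvInterleave ys xs
termination_by e o => e.length + o.length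

def untransposeEvenOdd_alt (S : String) : String :=
  let cs := S.toList
  let k := (cs.length + 1) / 2   -- math.ceil(len(S)/2)
  String.ofList (pvInterleave (cs.take k) (cs.drop k))

-- ===== PRECONDITION & SPEC =====
def Spec_untransposeEvenOdd (S : String) (out : String) : Prop := out = untransposeEvenOdd_alt S
instance (S : String) (out : String) : Decidable (Spec_untransposeEvenOdd S out) := by unfold Spec_untransposeEvenOdd; infer_instance

-- ===== CLAIM (what is proved, stated in full; the proofs are below) =====
def Claim_equal_untransposeEvenOdd : Prop := ∀ (S : String), Dom_untransposeEvenOdd S → Spec_untransposeEvenOdd S (untransposeEvenOdd S)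

-- ===== LEMMAS AND PROOFS =====

-- the per-index character A's loop appends
def pvPick (e o : List Char) (i : Nat) : List Char :=
  if i % 2 = 0 then (e[i / 2]?).toList else (o[i / 2]?).toList

lemma pvPick_shift (x : Char) (xs o : List Char) :
    (fun j => pvPick (x :: xs) o (j + 1)) = pvPick o xs := by
  funext j
  rcases Nat.even_or_odd j with h | h
  · have hj : j % 2 = 0 := Nat.even_iff.mp h
    have h1 : (j + 1) % 2 ≠ 0 := by omega
    have h2 : (j + 1) / 2 = j / 2 := by omega
    simp [pvPick, hj, h1, h2]
  · have hj : j % 2 ≠ 0 := by have := Nat.odd_iff.mp h; omega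
    have h1 : (j + 1) % 2 = 0 := by have := Nat.odd_iff.mp h; omega
    have h2 : (j + 1) / 2 = j / 2 + 1 := by omega
    simp [pvPick, hj, h1, h2]

lemma pvKey : ∀ (m : Nat) (e o : List Char), e.length + o.length = m →
    o.length ≤ e.length → e.length ≤ o.length + 1 →
    (List.range m).flatMap (pvPick e o) = pvInterleave e o := by
  intro m
  induction m using Nat.strong_induction_on with
  | _ m ih =>
    intro e o hm h1 h2
    cases e with
    | nil =>
      have ho : o = [] := by
        cases o with
        | nil => rfl
        | cons y ys => simp at h1
      subst ho
      simp at hm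
      subst hm
      simp [pvInterleave]
    | cons x xs =>
      obtain ⟨m', rfl⟩ : ∃ m', m = m' + 1 := ⟨xs.length + o.length, by simp at hm; omega⟩
      rw [List.range_succ_eq_map]
      have h0 : pvPick (x :: xs) o 0 = [x] := by simp [pvPick]
      rw [List.flatMap_cons, h0]
      have : (List.range m').flatMap (fun j => pvPick (x :: xs) o (j + 1)) =
          (List.range m').flatMap (pvPick o xs) := by rw [pvPick_shift]
      rw [List.flatMap_map]
      rw [this, ih m' (by omega) o xs (by simp at hm; omega) (by simp at h2; omega)
        (by simp at h1; omega)]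
      simp [pvInterleave]

-- ===== VERDICT (by name: the statement is the Claim_ definition above) =====
theorem untransposeEvenOdd_spec : Claim_equal_untransposeEvenOdd := by
  intro S _
  unfold Spec_untransposeEvenOdd untransposeEvenOdd untransposeEvenOdd_alt
  set cs := S.toList with hcs
  set n := cs.length with hn
  set k := (n + 1) / 2 with hk
  simp only [PySem.List.slice_to_natCast, PySem.List.slice_from_natCast]
  have hfold : (List.range n).foldl
      (fun r i => if i % 2 = 0 then r ++ ((cs.take k)[i / 2]?).toList
                  else r ++ ((cs.drop k)[i / 2]?).toList) [] =
      (List.range n).flatMap (pvPick (cs.take k) (cs.drop k)) := by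
    have := PySem.List.foldl_append_eq_flatMap (l := List.range n)
      (g := pvPick (cs.take k) (cs.drop k)) (acc := ([] : List Char))
    rw [show ([] ++ List.flatMap (pvPick (cs.take k) (cs.drop k)) (List.range n)) =
        List.flatMap (pvPick (cs.take k) (cs.drop k)) (List.range n) from by simp] at this
    rw [← this]
    apply PySem.List.foldl_congr_mem
    intro acc i _
    by_cases h : i % 2 = 0 <;> simp [pvPick, h]
  rw [hfold, pvKey n (cs.take k) (cs.drop k)
    (by simp [hk]; omega) (by simp [hk]; omega) (by simp [hk]; omega)]
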